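-- pv_equiv track=rewrite | github.com/jjabakker/BioPractice | Course.py | skew_diagram
-- ===== SOURCE A (Python) =====
-- def skew_diagram(sequence):
--
--     index = 0
--     skew = 0
--     skew_min_index = 0
--     skew_max_index = 0
--     skew_min = 0
--     skew_max = 0
--
--     for index in range(len(sequence)):
--         if sequence[index] == 'C':
--             skew -= 1
--         elif sequence[index] == 'G':
--             skew += 1
--         if skew < skew_min:
--             skew_min = skew
--             skew_min_index = index
--         elif skew > skew_max:
--             skew_max = skew
--             skew_max_index = index
--     return skew_min, skew_min_index, skew_max, skew_max_index
-- ===== SOURCE B (Python) =====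
-- def skew_diagram(sequence):
--     # Build the full prefix-skew list once, then take min/max with
--     # earliest-occurrence index over it (baseline 0 at index 0 included).
--     prefix = [0]
--     s = 0
--     for c in sequence:
--         if c == 'G':
--             s += 1
--         elif c == 'C':
--             s -= 1
--         prefix.append(s)
--     mn = min(prefix)
--     mx = max(prefix)
--     mi = prefix.index(mn)
--     ma = prefix.index(mx)
--     return mn, (mi - 1 if mi > 0 else 0), mx, (ma - 1 if ma > 0 else 0)
-- ===== Notes on version B (the rewrite author's own statement) =====
-- stated objective: alternative
-- what changed: A keeps running min/max with indices inside one accumulating loop; B first materialises the full prefix-skew list (baseline 0 included) and then obtains each extreme and its earliest index with min/max and list.index over that list.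
import Mathlib
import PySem

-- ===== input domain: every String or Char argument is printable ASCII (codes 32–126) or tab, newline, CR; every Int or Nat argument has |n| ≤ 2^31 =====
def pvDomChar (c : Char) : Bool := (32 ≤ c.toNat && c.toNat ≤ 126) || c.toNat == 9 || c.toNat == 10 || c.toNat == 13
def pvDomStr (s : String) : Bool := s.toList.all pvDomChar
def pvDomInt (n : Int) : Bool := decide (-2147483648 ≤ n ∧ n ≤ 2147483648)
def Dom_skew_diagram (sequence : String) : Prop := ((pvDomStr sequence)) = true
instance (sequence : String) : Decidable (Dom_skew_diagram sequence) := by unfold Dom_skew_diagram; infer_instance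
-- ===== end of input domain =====

-- B replaces A's single accumulating scan-with-running-extrema by a prefix-skew list
-- plus min/max-with-earliest-index over it (different decomposition, same cost).

-- ===== PORT A =====
-- for index in range(len(sequence)) with sequence[index]; the index is always in
-- range, so pyGetD's default ' ' is unreachable (Python never raises here).
def skew_diagram (sequence : String) : Int × Int × Int × Int :=
  let cs := sequence.toList
  let st :=
    (PySem.List.pyRange 0 (PySem.Str.len sequence) 1).foldl
      (fun (st : Int × Int × Int × Int × Int) (index : Int) =>
        let skew := if PySem.List.pyGetD cs index ' ' = 'C' then st.1 - 1
                    else if PySem.List.pyGetD cs index ' ' = 'G' then st.1 + 1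
                    else st.1
        if skew < st.2.1 then (skew, skew, index, st.2.2.2.1, st.2.2.2.2)
        else if skew > st.2.2.2.1 then (skew, st.2.1, st.2.2.1, skew, index)
        else (skew, st.2.1, st.2.2.1, st.2.2.2.1, st.2.2.2.2))
      (0, 0, 0, 0, 0)
  (st.2.1, st.2.2.1, st.2.2.2.1, st.2.2.2.2)

-- ===== PORT B =====
-- prefix list is nonempty ([0] seed), so min/max/index always succeed; .getD 0 is unreachable.
def skew_diagram_alt (sequence : String) : Int × Int × Int × Int :=
  let pb := sequence.toList.foldl
      (fun (acc : List Int × Int) c =>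
        let s := if c = 'G' then acc.2 + 1 else if c = 'C' then acc.2 - 1 else acc.2
        (acc.1 ++ [s], s))
      ([0], 0)
  let pre := pb.1
  let mn := (PySem.List.min? pre (fun x => x)).getD 0
  let mx := (PySem.List.max? pre (fun x => x)).getD 0
  let mi : Int := ((PySem.List.index? pre mn).getD 0 : Nat)
  let ma : Int := ((PySem.List.index? pre mx).getD 0 : Nat)
  (mn, if mi > 0 then mi - 1 else 0, mx, if ma > 0 then ma - 1 else 0)

-- ===== PRECONDITION & SPEC =====
def Spec_skew_diagram (sequence : String) (out : Int × Int × Int × Int) : Prop := out = skew_diagram_alt sequence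
instance (sequence : String) (out : Int × Int × Int × Int) : Decidable (Spec_skew_diagram sequence out) := by unfold Spec_skew_diagram; infer_instance

-- ===== CLAIM (what is proved, stated in full; the proofs are below) =====
def Claim_equal_skew_diagram : Prop := ∀ (sequence : String), Dom_skew_diagram sequence → Spec_skew_diagram sequence (skew_diagram sequence)

-- ===== LEMMAS AND PROOFS =====

def pvDelta (c : Char) : Int := if c = 'C' then -1 else if c = 'G' then 1 else 0

def pvPrefs (s : Int) : List Char → List Int
  | [] => []
  | c :: cs => (s + pvDelta c) :: pvPrefs (s + pvDelta c) cs

def pvTot (s : Int) (cs : List Char) : Int := s + (cs.map pvDelta).sum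

def pvIdx (l : List Int) (v : Int) : Int :=
  let k : Int := ((PySem.List.index? l v).getD 0 : Nat)
  if k > 0 then k - 1 else 0

def pvStep (st : Int × Int × Int × Int × Int) (p : Int × Char) : Int × Int × Int × Int × Int :=
  let skew := if p.2 = 'C' then st.1 - 1 else if p.2 = 'G' then st.1 + 1 else st.1
  if skew < st.2.1 then (skew, skew, p.1, st.2.2.2.1, st.2.2.2.2)
  else if skew > st.2.2.2.1 then (skew, st.2.1, st.2.2.1, skew, p.1)
  else (skew, st.2.1, st.2.2.1, st.2.2.2.1, st.2.2.2.2)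

lemma pvPrefs_append (s : Int) (cs ds : List Char) :
    pvPrefs s (cs ++ ds) = pvPrefs s cs ++ pvPrefs (pvTot s cs) ds := by
  induction cs generalizing s with
  | nil => simp [pvPrefs, pvTot]
  | cons c cs ih => simp [pvPrefs, pvTot, ih (s + pvDelta c), List.sum_cons]; ring_nf

lemma pvPrefs_length (s : Int) (cs : List Char) : (pvPrefs s cs).length = cs.length := by
  induction cs generalizing s with
  | nil => rfl
  | cons c cs ih => simp [pvPrefs, ih]

lemma pvTot_append (s : Int) (cs : List Char) (c : Char) :
    pvTot s (cs ++ [c]) = pvTot s cs + pvDelta c := by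
  simp [pvTot]; ring

lemma foldl_min_le (l : List Int) : ∀ (a : Int), ∀ x ∈ a :: l, l.foldl min a ≤ x := by
  induction l with
  | nil => intro a x hx; simp at hx; simp [hx]
  | cons b l ih =>
    intro a x hx
    simp only [List.foldl_cons]
    rcases List.mem_cons.mp hx with h | hx'
    · subst h; exact le_trans (ih (min x b) (min x b) (by simp)) (min_le_left x b)
    · rcases List.mem_cons.mp hx' with h | hx''
      · subst h; exact le_trans (ih (min a x) (min a x) (by simp)) (min_le_right a x)
      · exact ih (min a b) x (List.mem_cons_of_mem _ hx'')

lemma foldl_min_mem (l : List Int) : ∀ (a : Int), l.foldl min a ∈ a :: l := by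
  induction l with
  | nil => intro a; simp
  | cons b l ih =>
    intro a
    simp only [List.foldl_cons]
    rcases List.mem_cons.mp (ih (min a b)) with h | h
    · rw [h]; rcases min_choice a b with h' | h' <;> rw [h'] <;> simp
    · exact List.mem_cons_of_mem _ (List.mem_cons_of_mem _ h)

lemma foldl_le_max (l : List Int) : ∀ (a : Int), ∀ x ∈ a :: l, x ≤ l.foldl max a := by
  induction l with
  | nil => intro a x hx; simp at hx; simp [hx]
  | cons b l ih =>
    intro a x hx
    simp only [List.foldl_cons]
    rcases List.mem_cons.mp hx with h | hx'
    · subst h; exact le_trans (le_max_left x b) (ih (max x b) (max x b) (by simp))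
    · rcases List.mem_cons.mp hx' with h | hx''
      · subst h; exact le_trans (le_max_right a x) (ih (max a x) (max a x) (by simp))
      · exact ih (max a b) x (List.mem_cons_of_mem _ hx'')

lemma foldl_max_mem (l : List Int) : ∀ (a : Int), l.foldl max a ∈ a :: l := by
  induction l with
  | nil => intro a; simp
  | cons b l ih =>
    intro a
    simp only [List.foldl_cons]
    rcases List.mem_cons.mp (ih (max a b)) with h | h
    · rw [h]; rcases max_choice a b with h' | h' <;> rw [h'] <;> simp
    · exact List.mem_cons_of_mem _ (List.mem_cons_of_mem _ h)

-- index bookkeeping for a value strictly outside the old list, appended at the end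
lemma pvIdx_append_new (l : List Int) (v : Int) (hv : v ∉ l) (hl : l ≠ []) :
    pvIdx (l ++ [v]) v = (l.length : Int) - 1 := by
  rw [pvIdx, PySem.List.index?_append_singleton_self l v hv]
  have : l.length ≠ 0 := by simpa using hl
  simp only [Option.getD_some]
  rw [if_pos (by exact_mod_cast Nat.pos_of_ne_zero this)]

lemma pvIdx_append_old (l : List Int) (t : List Int) (v : Int) (hv : v ∈ l) :
    pvIdx (l ++ t) v = pvIdx l v := by
  rw [pvIdx, pvIdx, PySem.List.index?_append_of_mem t hv]

-- the central invariant: A's loop state after the whole scan, expressed through the prefix list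
lemma pvInv (cs : List Char) :
    (PySem.List.enumerate cs 0).foldl pvStep (0, 0, 0, 0, 0) =
      (pvTot 0 cs,
       (pvPrefs 0 cs).foldl min 0,
       pvIdx (0 :: pvPrefs 0 cs) ((pvPrefs 0 cs).foldl min 0),
       (pvPrefs 0 cs).foldl max 0,
       pvIdx (0 :: pvPrefs 0 cs) ((pvPrefs 0 cs).foldl max 0)) := by
  induction cs using List.reverseRecOn with
  | nil => simp [PySem.List.enumerate, pvPrefs, pvTot, pvIdx, PySem.List.index?]
  | append_singleton cs c ih =>
    have henum : PySem.List.enumerate (cs ++ [c]) 0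
        = PySem.List.enumerate cs 0 ++ [((cs.length : Int), c)] := by
      rw [PySem.List.enumerate_append]
      simp [PySem.List.enumerate]
    rw [henum, List.foldl_append, ih]
    set p := pvPrefs 0 cs with hp
    set mn := p.foldl min 0 with hmn
    set mx := p.foldl max 0 with hmx
    have hv : pvTot 0 cs + pvDelta c = pvTot 0 (cs ++ [c]) := (pvTot_append 0 cs c).symm
    have hpre : pvPrefs 0 (cs ++ [c]) = p ++ [pvTot 0 cs + pvDelta c] := by
      rw [pvPrefs_append]; simp [pvPrefs, ← hp]
    set v := pvTot 0 cs + pvDelta c with hvdef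
    have hskew : (if c = 'C' then pvTot 0 cs - 1 else if c = 'G' then pvTot 0 cs + 1 else pvTot 0 cs) = v := by
      simp only [hvdef, pvDelta]; split_ifs <;> ring
    have hminle : ∀ x ∈ (0 : Int) :: p, mn ≤ x := foldl_min_le p 0
    have hmaxge : ∀ x ∈ (0 : Int) :: p, x ≤ mx := foldl_le_max p 0
    have hmn0 : mn ≤ 0 := hminle 0 (by simp)
    have hmx0 : (0 : Int) ≤ mx := hmaxge 0 (by simp)
    have hmnmem : mn ∈ (0 : Int) :: p := foldl_min_mem p 0
    have hmxmem : mx ∈ (0 : Int) :: p := foldl_max_mem p 0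
    have hminfold : (pvPrefs 0 (cs ++ [c])).foldl min 0 = min mn v := by
      rw [hpre, List.foldl_append]; rfl
    have hmaxfold : (pvPrefs 0 (cs ++ [c])).foldl max 0 = max mx v := by
      rw [hpre, List.foldl_append]; rfl
    have hpre' : (0 : Int) :: pvPrefs 0 (cs ++ [c]) = ((0 : Int) :: p) ++ [v] := by
      rw [hpre]; rfl
    have hlen : (((0 : Int) :: p).length : Int) - 1 = (cs.length : Int) := by
      simp [hp, pvPrefs_length]
    simp only [List.foldl_cons, List.foldl_nil, pvStep, hskew]
    by_cases h1 : v < mn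
    · -- new strict minimum: min side takes v at index cs.length, max side untouched
      have hvnot : v ∉ (0 : Int) :: p := fun hm => absurd (hminle v hm) (by omega)
      have hmin' : min mn v = v := by omega
      have hmax' : max mx v = mx := by rw [max_eq_left]; omega
      rw [if_pos h1, hv, hminfold, hmaxfold, hmin', hmax', hpre',
        pvIdx_append_new _ _ hvnot (by simp), pvIdx_append_old _ _ _ hmxmem, hlen, hv]
    · rw [if_neg h1]
      have hmin' : min mn v = mn := by omega
      by_cases h2 : v > mx
      · -- new strict maximum
        have hvnot : v ∉ (0 : Int) :: p := fun hm => absurd (hmaxge v hm) (by omega)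
        have hmax' : max mx v = v := by omega
        rw [if_pos h2, hv, hminfold, hmaxfold, hmin', hmax', hpre',
          pvIdx_append_new _ _ hvnot (by simp), pvIdx_append_old _ _ _ hmnmem, hlen, hv]
      · -- neither extreme moves
        have hmax' : max mx v = mx := by omega
        rw [if_neg h2, hv, hminfold, hmaxfold, hmin', hmax', hpre',
          pvIdx_append_old _ _ _ hmnmem, pvIdx_append_old _ _ _ hmxmem]

-- A's pyRange/pyGetD loop is the fold of pvStep over enumerate
lemma skew_diagram_eq_fold (sequence : String) :
    skew_diagram sequence =
      (let st := (PySem.List.enumerate sequence.toList 0).foldl pvStep (0, 0, 0, 0, 0)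
       (st.2.1, st.2.2.1, st.2.2.2.1, st.2.2.2.2)) := by
  unfold skew_diagram
  rw [PySem.List.enumerate_eq_map_pyRange sequence.toList ' ', List.foldl_map]
  simp [PySem.Str.len_eq, PySem.List.len_eq, pvStep]

-- B's accumulating pass builds exactly the prefix list with its running total
lemma pvFoldB (cs : List Char) (l : List Int) (s : Int) :
    cs.foldl
      (fun (acc : List Int × Int) c =>
        let s := if c = 'G' then acc.2 + 1 else if c = 'C' then acc.2 - 1 else acc.2
        (acc.1 ++ [s], s))
      (l, s) = (l ++ pvPrefs s cs, pvTot s cs) := by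
  induction cs generalizing l s with
  | nil => simp [pvPrefs, pvTot]
  | cons c cs ih =>
    have hstep : (if c = 'G' then s + 1 else if c = 'C' then s - 1 else s) = s + pvDelta c := by
      simp only [pvDelta]
      by_cases hG : c = 'G'
      · have : ¬ c = 'C' := by rw [hG]; decide
        simp [hG]
      · split_ifs <;> simp_all; ring
    simp only [List.foldl_cons, hstep, ih, Prod.mk.injEq]
    refine ⟨by simp [pvPrefs], by simp [pvTot, List.sum_cons]; ring⟩

lemma skew_diagram_alt_eq (sequence : String) :
    skew_diagram_alt sequence =
      ((pvPrefs 0 sequence.toList).foldl min 0,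
       pvIdx (0 :: pvPrefs 0 sequence.toList) ((pvPrefs 0 sequence.toList).foldl min 0),
       (pvPrefs 0 sequence.toList).foldl max 0,
       pvIdx (0 :: pvPrefs 0 sequence.toList) ((pvPrefs 0 sequence.toList).foldl max 0)) := by
  unfold skew_diagram_alt
  rw [pvFoldB]
  simp only [List.singleton_append]
  rw [PySem.List.min?_id_cons, PySem.List.max?_id_cons]
  simp [pvIdx]

-- ===== VERDICT (by name: the statement is the Claim_ definition above) =====
theorem skew_diagram_spec : Claim_equal_skew_diagram := by
  intro sequence _
  unfold Spec_skew_diagram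
  rw [skew_diagram_eq_fold, skew_diagram_alt_eq]
  simp only [pvInv]
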